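-- pv_equiv track=rewrite | github.com/sahulshaik04/Interview-prep | count_palindrome_inlist.py | count_palindrome
-- ===== SOURCE A (Python) =====
-- def count_palindrome(lst):
--     n=len(lst)
--     count=0
--     left=0
--     right=left+2
--     while(right<n):
--         if lst[left]==lst[right]:
--             count+=1
--         left+=1
--         right+=1
--     return count
-- ===== SOURCE B (Python) =====
-- def count_palindrome(lst):
--     evens = lst[::2]
--     odds = lst[1::2]
--
--     def adj(seq):
--         return sum(1 for x, y in zip(seq, seq[1:]) if x == y)
--
--     return adj(evens) + adj(odds)
-- ===== Notes on version B (the rewrite author's own statement) =====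
-- stated objective: alternative
-- what changed: Instead of a single stride-2 sliding-window while loop with explicit left/right index bookkeeping, B splits the list into the even-index and odd-index subsequences and counts adjacent equal pairs in each via zip, summing the two counts.
import Mathlib
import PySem

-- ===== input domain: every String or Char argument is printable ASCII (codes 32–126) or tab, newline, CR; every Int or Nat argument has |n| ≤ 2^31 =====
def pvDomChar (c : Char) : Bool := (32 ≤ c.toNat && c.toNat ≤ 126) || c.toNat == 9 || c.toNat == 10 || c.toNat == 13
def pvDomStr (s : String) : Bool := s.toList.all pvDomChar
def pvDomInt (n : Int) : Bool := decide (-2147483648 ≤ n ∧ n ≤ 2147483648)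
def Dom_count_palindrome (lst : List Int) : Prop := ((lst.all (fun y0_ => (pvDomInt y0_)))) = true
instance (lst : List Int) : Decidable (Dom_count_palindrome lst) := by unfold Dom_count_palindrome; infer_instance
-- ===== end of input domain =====

-- B replaces A's stride-2 sliding-window while loop by splitting the list into the
-- even-index and odd-index subsequences and counting adjacent equal pairs in each (alternative decomposition).

-- ===== PORT A =====
-- the while loop of A; indices are always in range while right < n, so pyGetD's default is never used
def pvALoop (lst : List Int) (n count left right : Int) : Int :=
  if right < n then
    pvALoop lst n
      (if PySem.List.pyGetD lst left 0 = PySem.List.pyGetD lst right 0 then count + 1 else count)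
      (left + 1) (right + 1)
  else count
termination_by (n - right).toNat
decreasing_by omega

def count_palindrome (lst : List Int) : Int :=
  let n : Int := lst.length
  pvALoop lst n 0 0 2

-- ===== PORT B =====
-- hand port of the stride-2 slice lst[::2] (PySem has no stepped list slice); exact for step 2 from index 0
def pvEvery2 : List Int → List Int
  | [] => []
  | [x] => [x]
  | x :: _ :: r => x :: pvEvery2 r

-- adj(seq) = number of adjacent positions with equal elements, via zip(seq, seq[1:])
def pvAdj (seq : List Int) : Int :=
  ((seq.zip (PySem.List.slice seq (some 1) none)).countP (fun p => p.1 == p.2) : Nat)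

def count_palindrome_alt (lst : List Int) : Int :=
  let evens := pvEvery2 lst
  let odds := pvEvery2 (PySem.List.slice lst (some 1) none)
  pvAdj evens + pvAdj odds

-- ===== PRECONDITION & SPEC =====
def Spec_count_palindrome (lst : List Int) (out : Int) : Prop := out = count_palindrome_alt lst
instance (lst : List Int) (out : Int) : Decidable (Spec_count_palindrome lst out) := by unfold Spec_count_palindrome; infer_instance

-- ===== CLAIM (what is proved, stated in full; the proofs are below) =====
def Claim_equal_count_palindrome : Prop := ∀ (lst : List Int), Dom_count_palindrome lst → Spec_count_palindrome lst (count_palindrome lst)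

-- ===== LEMMAS AND PROOFS =====

-- reference count: pairs two apart
def pvPairCount : List Int → Int
  | x :: y :: z :: r => (if x = z then 1 else 0) + pvPairCount (y :: z :: r)
  | _ => 0

lemma pvALoop_eq (lst : List Int) (count : Int) (left : Nat) :
    pvALoop lst lst.length count left ((left : Int) + 2) = count + pvPairCount (lst.drop left) := by
  by_cases h : (left : Int) + 2 < lst.length
  · have hlen : left + 2 < lst.length := by exact_mod_cast (by omega : (left : Int) + 2 < (lst.length : Int))
    rw [pvALoop]
    simp only [h, if_true]
    have h1 : ((left : Int) + 1) = ((left + 1 : Nat) : Int) := by push_cast; ring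
    have h2 : ((left : Int) + 2 + 1) = (((left + 1 : Nat) : Int) + 2) := by push_cast; ring
    have hg1 : PySem.List.pyGetD lst (left : Int) 0 = lst[left]'(by omega) := by
      rw [PySem.List.pyGetD_natCast]; exact List.getD_eq_getElem _ _ (by omega)
    have hg2 : PySem.List.pyGetD lst ((left : Int) + 2) 0 = lst[left + 2]'(by omega) := by
      have : ((left : Int) + 2) = ((left + 2 : Nat) : Int) := by push_cast; ring
      rw [this, PySem.List.pyGetD_natCast]; exact List.getD_eq_getElem _ _ (by omega)
    rw [h1, h2, pvALoop_eq lst _ (left + 1), hg1, hg2]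
    -- drop left lst starts with lst[left], lst[left+1], lst[left+2]
    have hd : lst.drop left = lst[left]'(by omega) :: lst[left+1]'(by omega) :: lst[left+2]'(by omega) :: lst.drop (left + 3) := by
      rw [List.drop_eq_getElem_cons (by omega), List.drop_eq_getElem_cons (h := by omega),
          List.drop_eq_getElem_cons (h := by omega)]
    have hd1 : lst.drop (left + 1) = lst[left+1]'(by omega) :: lst[left+2]'(by omega) :: lst.drop (left + 3) := by
      rw [List.drop_eq_getElem_cons (by omega), List.drop_eq_getElem_cons (h := by omega)]
    rw [hd, hd1, pvPairCount]
    split_ifs <;> ring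
  · rw [pvALoop]
    simp only [h, if_false]
    have : pvPairCount (lst.drop left) = 0 := by
      have hsh : (lst.drop left).length ≤ 2 := by
        have := List.length_drop (l := lst) (i := left)
        omega
      match hm : lst.drop left with
      | [] => rfl
      | [_] => rfl
      | [_, _] => rfl
      | _ :: _ :: _ :: _ => rw [hm] at hsh; simp at hsh
    omega
termination_by lst.length - left
decreasing_by omega

lemma pvAdj_cons (x : Int) (s : List Int) :
    pvAdj (x :: s) = (match s with
      | [] => 0
      | y :: _ => (if x = y then 1 else 0) + pvAdj s) := by
  match s with
  | [] => rfl
  | y :: t =>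
    by_cases h : x = y
    · simp [pvAdj, PySem.List.slice_from_one, h]; ring
    · simp [pvAdj, PySem.List.slice_from_one, h]

lemma pvKey : ∀ lst : List Int,
    pvAdj (pvEvery2 lst) + pvAdj (pvEvery2 lst.tail) = pvPairCount lst
  | [] => rfl
  | [_] => rfl
  | [_, _] => rfl
  | x :: y :: z :: r => by
    have ih := pvKey (y :: z :: r)
    have he : pvEvery2 (x :: y :: z :: r) = x :: pvEvery2 (z :: r) := rfl
    have ho : (x :: y :: z :: r).tail = y :: z :: r := rfl
    have hez : pvEvery2 (z :: r) = z :: pvEvery2 r.tail := by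
      match r with
      | [] => rfl
      | _ :: _ => rfl
    have ht : (y :: z :: r).tail = z :: r := rfl
    rw [ht, hez] at ih
    rw [he, ho, hez, pvAdj_cons]
    simp only [pvPairCount]
    split_ifs <;> omega

-- ===== VERDICT (by name: the statement is the Claim_ definition above) =====
theorem count_palindrome_spec : Claim_equal_count_palindrome := by
  intro lst _
  unfold Spec_count_palindrome count_palindrome count_palindrome_alt
  have h0 : ((0 : Nat) : Int) + 2 = 2 := by norm_num
  have := pvALoop_eq lst 0 0
  rw [h0] at this
  simp only [Nat.cast_zero] at this ⊢
  rw [this]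
  rw [PySem.List.slice_from_one]
  rw [pvKey lst]
  simp
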